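-- pv_equiv track=rewrite | github.com/apache/tvm | topi/python/topi/util.py | ravel_index
-- ===== SOURCE A (Python) =====
-- def ravel_index(indices, shape):
--     """Flatten the index tuple to 1D
--
--     Parameters
--     ----------
--     indices : tuple of int or tvm.tir.IntImm
--         The input coordinates
--
--     shape : tuple of int
--         Shape of the tensor.
--
--     Returns
--     -------
--     idx : int or Expr
--         The index after flattening
--     """
--     idx = None
--     for i, (shape_val, ind) in enumerate(zip(shape, indices)):
--         if i != 0:
--             idx = idx * shape_val + ind
--         else:
--             idx = ind
--     return idx
-- ===== SOURCE B (Python) =====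
-- def ravel_index(indices, shape):
--     """Flatten the index tuple to 1D (sum of index*stride, right-to-left)."""
--     idx = None
--     stride = 1
--     for shape_val, ind in reversed(list(zip(shape, indices))):
--         idx = ind * stride if idx is None else idx + ind * stride
--         stride = stride * shape_val
--     return idx
-- ===== Notes on version B (the rewrite author's own statement) =====
-- stated objective: alternative
-- what changed: Replaces the left-to-right Horner recurrence with a right-to-left sum of index*stride terms, maintaining a running trailing-dimension stride product.
-- outside the precondition, e.g. on ravel_index((), ()): A returns None, B returns None; on ravel_index((1, 2), ()): A returns None, B returns None
import Mathlib
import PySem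

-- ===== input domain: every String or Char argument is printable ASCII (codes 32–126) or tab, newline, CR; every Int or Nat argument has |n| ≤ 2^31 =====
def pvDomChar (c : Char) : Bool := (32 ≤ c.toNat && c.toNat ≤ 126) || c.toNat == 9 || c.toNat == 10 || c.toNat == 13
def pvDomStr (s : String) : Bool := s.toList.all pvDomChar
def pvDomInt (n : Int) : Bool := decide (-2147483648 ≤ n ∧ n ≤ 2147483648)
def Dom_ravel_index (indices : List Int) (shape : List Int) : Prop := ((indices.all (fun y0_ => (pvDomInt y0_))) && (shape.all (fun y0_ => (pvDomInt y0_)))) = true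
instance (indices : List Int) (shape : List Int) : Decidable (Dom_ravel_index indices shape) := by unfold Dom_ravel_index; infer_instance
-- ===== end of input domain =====

-- B replaces A's left-to-right Horner recurrence by a right-to-left sum of index*stride
-- terms with a running trailing-stride product (alternative decomposition, same cost).


-- ===== PORT A =====
-- A: Horner, enumerate counter i decides the branch; Python returns None on empty zip
-- (excluded by Pre_), the port yields 0 there via getD.
def ravel_index (indices : List Int) (shape : List Int) : Int :=
  (((List.zip shape indices).foldl
      (fun (st : Nat × Option Int) p =>
        if st.1 ≠ 0 then (st.1 + 1, some ((st.2.getD 0) * p.1 + p.2))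
        else (st.1 + 1, some p.2))
      (0, none)).2).getD 0

-- ===== PORT B =====
-- B: reversed zip, idx accumulates ind*stride, stride multiplies up the shape values.
def ravel_index_alt (indices : List Int) (shape : List Int) : Int :=
  (((List.zip shape indices).reverse.foldl
      (fun (st : Option Int × Int) p =>
        (some (match st.1 with
               | none => p.2 * st.2
               | some v => v + p.2 * st.2), st.2 * p.1))
      (none, 1)).1).getD 0

-- ===== PRECONDITION & SPEC =====
-- Pre_ excludes empty indices or shape: there zip is empty and Python A returns None,
-- which is not an int.
def Pre_ravel_index (indices : List Int) (shape : List Int) : Prop := indices ≠ [] ∧ shape ≠ []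
instance (indices : List Int) (shape : List Int) : Decidable (Pre_ravel_index indices shape) := by unfold Pre_ravel_index; infer_instance
def pvWitness_ravel_index : List Int × List Int := ([3, 1, 2], [4, 5, 6])

def Spec_ravel_index (indices : List Int) (shape : List Int) (out : Int) : Prop := out = ravel_index_alt indices shape
instance (indices : List Int) (shape : List Int) (out : Int) : Decidable (Spec_ravel_index indices shape out) := by unfold Spec_ravel_index; infer_instance

-- ===== CLAIM (what is proved, stated in full; the proofs are below) =====
def Claim_equal_ravel_index : Prop := ∀ (indices : List Int) (shape : List Int), Dom_ravel_index indices shape → Pre_ravel_index indices shape → Spec_ravel_index indices shape (ravel_index indices shape)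

-- ===== LEMMAS AND PROOFS =====

-- mathematical characterisation: P = product of shape components, H = flat index
def pvProd (l : List (Int × Int)) : Int := l.foldr (fun p a => p.1 * a) 1
def pvH : List (Int × Int) → Int
  | [] => 0
  | p :: t => p.2 * pvProd t + pvH t

-- Horner fold (the body of A after the first step)
def pvHfold (a : Int) (l : List (Int × Int)) : Int := l.foldl (fun a p => a * p.1 + p.2) a

lemma pvHfold_eq (l : List (Int × Int)) : ∀ a : Int, pvHfold a l = a * pvProd l + pvH l := by
  induction l with
  | nil => intro a; simp [pvHfold, pvProd, pvH]
  | cons p t ih =>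
    intro a
    have h1 : pvHfold (a * p.1 + p.2) t = (a * p.1 + p.2) * pvProd t + pvH t := ih _
    simp only [pvHfold, List.foldl] at h1 ⊢
    rw [h1]
    simp [pvProd, pvH]; ring

-- A's fold after the first step stays in the i ≠ 0 branch
lemma pvA_fold (l : List (Int × Int)) : ∀ (a : Int) (j : Nat),
    (l.foldl
      (fun (st : Nat × Option Int) p =>
        if st.1 ≠ 0 then (st.1 + 1, some ((st.2.getD 0) * p.1 + p.2))
        else (st.1 + 1, some p.2))
      (j + 1, some a)).2 = some (pvHfold a l) := by
  induction l with
  | nil => intro a j; simp [pvHfold]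
  | cons p t ih =>
    intro a j
    simp only [List.foldl, pvHfold]
    rw [if_pos (by omega)]
    exact ih (a * p.1 + p.2) (j + 1)

-- B's fold over the reversed list computes (H, prod)
lemma pvB_fold (l : List (Int × Int)) :
    l.reverse.foldl
      (fun (st : Option Int × Int) p =>
        (some (match st.1 with
               | none => p.2 * st.2
               | some v => v + p.2 * st.2), st.2 * p.1))
      (none, 1)
    = ((match l with | [] => none | _ => some (pvH l)), pvProd l) := by
  induction l with
  | nil => simp [pvProd]
  | cons p t ih =>
    rw [List.reverse_cons, List.foldl_append, ih]
    cases t with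
    | nil => simp [pvH, pvProd]
    | cons q r =>
      simp only [List.foldl]
      refine Prod.ext ?_ ?_
      · simp only [pvH, pvProd]; congr 1; ring
      · simp only [pvProd, List.foldr]; ring

lemma ravel_index_eq_H (indices shape : List Int) (h : List.zip shape indices ≠ []) :
    ravel_index indices shape = pvH (List.zip shape indices) := by
  unfold ravel_index
  cases hz : List.zip shape indices with
  | nil => exact absurd hz h
  | cons p t =>
    simp only [List.foldl]
    rw [if_neg (by simp)]
    rw [pvA_fold t p.2 0]
    simp only [Option.getD_some, pvHfold_eq, pvH]

lemma ravel_index_alt_eq_H (indices shape : List Int) (h : List.zip shape indices ≠ []) :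
    ravel_index_alt indices shape = pvH (List.zip shape indices) := by
  unfold ravel_index_alt
  rw [pvB_fold]
  cases hz : List.zip shape indices with
  | nil => exact absurd hz h
  | cons p t => simp

-- ===== VERDICT (by name: the statement is the Claim_ definition above) =====
theorem ravel_index_spec : Claim_equal_ravel_index := by
  intro indices shape _ hpre
  obtain ⟨hi, hs⟩ := hpre
  have hz : List.zip shape indices ≠ [] := by
    cases shape with
    | nil => exact absurd rfl hs
    | cons a t =>
      cases indices with
      | nil => exact absurd rfl hi
      | cons b u => simp [List.zip]
  unfold Spec_ravel_index
  rw [ravel_index_eq_H indices shape hz, ravel_index_alt_eq_H indices shape hz]
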